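-- pv_equiv track=rewrite | github.com/tlian25/advent-of-code-2021 | solutions/day17_trick_shot.py | travel_y
-- ===== SOURCE A (Python) =====
-- def inside_range(x, xs):
--     if x < xs[0]: return -1
--     if xs[0] <= x <= xs[1]: return 0
--     if x > xs[1]: return 1
--
-- def travel_y(y, ys, t):
--     yval = 0
--     maxy = 0
--     while t > 0:
--         yval += y
--         maxy = max(maxy, yval)
--         y -= 1
--
--         status = inside_range(yval, ys)
--         if status == 0:
--             return maxy
--         elif status == -1:
--             return -1
--
--     return -2
-- ===== SOURCE B (Python) =====
-- def travel_y(y, ys, t):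
--     # Closed-form peak + binary search for the first step at/below the top of the range,
--     # instead of simulating the trajectory step by step.
--     if t <= 0:
--         return -2
--     low, top = ys[0], ys[1]
--     if y <= top:
--         # the very first step already lands at or below the top of the range
--         return max(0, y) if y >= low else -1
--     maxy = y * (y + 1) // 2 if y > 0 else 0
--     def pos(k):
--         return k * y - k * (k - 1) // 2
--     lo = max(y, 0) + 1             # pos(lo) > top and pos is strictly decreasing from lo on
--     hi = lo + (pos(lo) - top)      # pos(hi) <= top
--     while hi - lo > 1:
--         mid = (lo + hi) // 2
--         if pos(mid) > top:
--             lo = mid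
--         else:
--             hi = mid
--     return maxy if pos(hi) >= low else -1
-- ===== Notes on version B (the rewrite author's own statement) =====
-- stated objective: faster
-- what changed: A simulates the projectile one step at a time until it enters or overshoots the range; B computes the peak in closed form (y*(y+1)//2) and binary-searches the first step at or below the top of the range on the quadratic position formula pos(k)=k*y-k*(k-1)//2.
-- outside the precondition, e.g. on travel_y(1, [6], 2): A returns -1, B raises IndexError
import Mathlib
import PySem

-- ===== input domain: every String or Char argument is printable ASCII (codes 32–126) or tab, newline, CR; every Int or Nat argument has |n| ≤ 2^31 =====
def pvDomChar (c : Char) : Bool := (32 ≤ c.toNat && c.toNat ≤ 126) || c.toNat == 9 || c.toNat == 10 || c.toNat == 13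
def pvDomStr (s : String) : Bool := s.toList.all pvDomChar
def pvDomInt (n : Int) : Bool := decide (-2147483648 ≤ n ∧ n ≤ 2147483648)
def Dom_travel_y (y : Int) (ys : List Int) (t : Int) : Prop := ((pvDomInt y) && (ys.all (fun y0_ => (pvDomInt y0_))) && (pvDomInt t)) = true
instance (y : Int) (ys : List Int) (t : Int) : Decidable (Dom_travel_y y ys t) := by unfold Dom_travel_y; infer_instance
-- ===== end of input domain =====

-- B replaces A's step-by-step trajectory simulation by the closed-form peak y*(y+1)//2 and a
-- binary search for the first step at or below the top of the target range (objective: faster).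

-- ===== PORT A =====
-- helpers for the termination measure of A's while-loop (the loop always exits because the
-- position eventually falls below the range)
def pvTri (y : Int) : Int := ((y.toNat * (y.toNat + 1)) / 2 : Nat)

def pvM (ys : List Int) : Int :=
  max ((PySem.List.pyGet? ys 0).getD 0) ((PySem.List.pyGet? ys 1).getD 0 + 1)

def pvMeasure (ys : List Int) (yval y : Int) : Nat :=
  (yval + pvTri y - pvM ys + 1).toNat + (y + 1).toNat

-- Python's inside_range; its final 'x > xs[1]' guard is exhaustive when the first two fail,
-- so the port returns 1 in that branch.
def insideRange (x : Int) (xs : List Int) : Int :=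
  let xs0 := (PySem.List.pyGet? xs 0).getD 0
  let xs1 := (PySem.List.pyGet? xs 1).getD 0
  if x < xs0 then -1
  else if xs0 ≤ x ∧ x ≤ xs1 then 0
  else 1

-- the body of A's 'while t > 0' loop (t is never changed inside the loop, so for t > 0 the
-- loop runs until one of the two return statements fires).  The Nat argument is fuel, a pure
-- totality guard: it starts at pvMeasure + 1, which strictly exceeds the iteration count
-- (pvMeasure decreases every iteration), so the fuel-0 branch is never reached.
def travelLoop (ys : List Int) : Nat → Int → Int → Int → Int
  | 0, _, _, _ => 0
  | n + 1, yval, maxy, y =>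
    let yval' := yval + y
    let maxy' := max maxy yval'
    let y' := y - 1
    let status := insideRange yval' ys
    if status = 0 then maxy'
    else if status = -1 then -1
    else travelLoop ys n yval' maxy' y'

def travel_y (y : Int) (ys : List Int) (t : Int) : Int :=
  if t > 0 then travelLoop ys (pvMeasure ys 0 y + 1) 0 0 y else -2

-- ===== PORT B =====
-- position after k steps: pos(k) = k*y - k*(k-1)//2
def posB (y k : Int) : Int := k * y - PySem.Int.floordiv (k * (k - 1)) 2

-- binary search: first index in (lo, hi] whose position is at or below 'top'.  The Nat
-- argument is fuel, a pure totality guard: it starts at (hi - lo).toNat, which bounds the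
-- number of halvings, so the fuel-0 branch is never reached.
def bsearchB (y top : Int) : Nat → Int → Int → Int
  | 0, _, hi => hi
  | n + 1, lo, hi =>
    if hi - lo > 1 then
      let mid := PySem.Int.floordiv (lo + hi) 2
      if posB y mid > top then bsearchB y top n mid hi else bsearchB y top n lo mid
    else hi

def travel_y_alt (y : Int) (ys : List Int) (t : Int) : Int :=
  if t ≤ 0 then -2
  else
    let low := (PySem.List.pyGet? ys 0).getD 0
    let top := (PySem.List.pyGet? ys 1).getD 0
    if y ≤ top then (if y ≥ low then max 0 y else -1)
    else
      let maxy := if y > 0 then PySem.Int.floordiv (y * (y + 1)) 2 else 0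
      let lo := max y 0 + 1
      let hi := lo + (posB y lo - top)
      let k := bsearchB y top (hi - lo).toNat lo hi
      if posB y k ≥ low then maxy else -1

-- ===== PRECONDITION & SPEC =====
-- Pre_ excludes t > 0 with fewer than two range bounds in ys: there B raises IndexError
-- (it always reads ys[1]), while A either raises too or happens to return -1 first when the
-- very first position is already below ys[0] (its chained comparison reads ys[1] lazily).
def Pre_travel_y (y : Int) (ys : List Int) (t : Int) : Prop := t ≤ 0 ∨ 2 ≤ ys.length
instance (y : Int) (ys : List Int) (t : Int) : Decidable (Pre_travel_y y ys t) := by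
  unfold Pre_travel_y; infer_instance

def pvWitness_travel_y : Int × List Int × Int := (2, [3, 6], 1)

def Spec_travel_y (y : Int) (ys : List Int) (t : Int) (out : Int) : Prop := out = travel_y_alt y ys t
instance (y : Int) (ys : List Int) (t : Int) (out : Int) : Decidable (Spec_travel_y y ys t out) := by unfold Spec_travel_y; infer_instance

-- ===== CLAIM (what is proved, stated in full; the proofs are below) =====
def Claim_equal_travel_y : Prop := ∀ (y : Int) (ys : List Int) (t : Int), Dom_travel_y y ys t → Pre_travel_y y ys t → Spec_travel_y y ys t (travel_y y ys t)

-- ===== LEMMAS AND PROOFS =====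

-- proof-side model of A's trajectory: position and running maximum after k steps
def pA (y0 : Int) : Nat → Int
  | 0 => 0
  | k + 1 => pA y0 k + (y0 - k)

def mxA (y0 : Int) : Nat → Int
  | 0 => 0
  | k + 1 => max (mxA y0 k) (pA y0 (k + 1))

theorem floordiv_two_add (a b : Int) :
    PySem.Int.floordiv (a + 2 * b) 2 = PySem.Int.floordiv a 2 + b := by
  rw [PySem.Int.floordiv_eq_ediv_of_pos (by omega), PySem.Int.floordiv_eq_ediv_of_pos (by omega)]
  omega

theorem posB_zero (y0 : Int) : posB y0 0 = 0 := by
  unfold posB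
  rw [show (0 : Int) * (0 - 1) = 0 by ring, PySem.Int.floordiv_eq_ediv_of_pos (by omega)]
  simp

theorem posB_succ (y0 : Int) (k : Int) : posB y0 (k + 1) = posB y0 k + (y0 - k) := by
  unfold posB
  rw [show (k + 1) * (k + 1 - 1) = k * (k - 1) + 2 * k by ring, floordiv_two_add]
  ring

theorem posB_natCast (y0 : Int) (n : Nat) : posB y0 (n : Int) = pA y0 n := by
  induction n with
  | zero => simpa using posB_zero y0
  | succ k ih =>
      have : ((k + 1 : Nat) : Int) = (k : Int) + 1 := by push_cast; ring
      rw [this, posB_succ, ih]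
      simp [pA]

-- pA is nondecreasing while the step y0 - k is still nonnegative
theorem pA_incr (y0 : Int) (i j : Nat) (hij : i ≤ j) (hj : (j : Int) ≤ y0 + 1) :
    pA y0 i ≤ pA y0 j := by
  induction j with
  | zero => have : i = 0 := by omega
            subst this; omega
  | succ k ih =>
      rcases Nat.eq_or_lt_of_le hij with h | h
      · subst h; omega
      · have h1 : pA y0 i ≤ pA y0 k := ih (by omega) (by push_cast at hj ⊢; omega)
        have h2 : (0 : Int) ≤ y0 - k := by push_cast at hj; omega
        simp only [pA]; omega

-- pA drops by at least one per step once the index exceeds y0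
theorem pA_decr_strict (y0 : Int) (i j : Nat) (hij : i ≤ j) (hi : y0 < (i : Int)) :
    pA y0 j ≤ pA y0 i - ((j : Int) - i) := by
  induction j with
  | zero => have : i = 0 := by omega
            subst this; omega
  | succ k ih =>
      rcases Nat.eq_or_lt_of_le hij with h | h
      · subst h; omega
      · have h1 := ih (by omega)
        have h2 : y0 - (k : Int) ≤ -1 := by omega
        simp only [pA]; push_cast; push_cast at h1; omega

-- pA never rises once the index is at least y0
theorem pA_decr (y0 : Int) (i j : Nat) (hij : i ≤ j) (hi : y0 ≤ (i : Int)) :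
    pA y0 j ≤ pA y0 i := by
  induction j with
  | zero => have : i = 0 := by omega
            subst this; omega
  | succ k ih =>
      rcases Nat.eq_or_lt_of_le hij with h | h
      · subst h; omega
      · have h1 := ih (by omega)
        have h2 : y0 - (k : Int) ≤ 0 := by omega
        simp only [pA]; omega

theorem mxA_nonpos (y0 : Int) (hy : y0 ≤ 0) (k : Nat) : mxA y0 k = 0 := by
  induction k with
  | zero => rfl
  | succ n ih =>
      have h1 : pA y0 (n + 1) ≤ pA y0 0 := pA_decr y0 0 (n + 1) (by omega) (by simpa using hy)
      simp only [mxA, ih]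
      simp only [pA] at h1 ⊢
      omega

theorem mxA_ascend (y0 : Int) (_hy : 0 ≤ y0) (k : Nat) (hk : (k : Int) ≤ y0 + 1) :
    mxA y0 k = pA y0 k := by
  induction k with
  | zero => rfl
  | succ n ih =>
      have h1 : pA y0 n ≤ pA y0 (n + 1) := pA_incr y0 n (n + 1) (by omega) hk
      have h2 := ih (by push_cast at hk ⊢; omega)
      simp only [mxA, h2]
      omega

theorem mxA_peak (y0 : Int) (hy : 0 ≤ y0) (k : Nat) (hk : y0.toNat + 1 ≤ k) :
    mxA y0 k = pA y0 (y0.toNat + 1) := by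
  induction k with
  | zero => omega
  | succ n ih =>
      rcases Nat.eq_or_lt_of_le hk with h | h
      · rw [← h, mxA_ascend y0 hy (y0.toNat + 1) (by push_cast; omega)]
      · have h1 : pA y0 (n + 1) ≤ pA y0 (y0.toNat + 1) :=
          pA_decr y0 (y0.toNat + 1) (n + 1) (by omega) (by push_cast; omega)
        have h2 := ih (by omega)
        simp only [mxA, h2]
        omega

theorem pvTri_pred (y : Int) (h : 1 ≤ y) : pvTri y = y + pvTri (y - 1) := by
  unfold pvTri
  obtain ⟨g, hg⟩ : ∃ g : Nat, y.toNat = g + 1 := ⟨y.toNat - 1, by omega⟩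
  have h1 : (y - 1).toNat = g := by omega
  have h2 : (g + 1) * (g + 1 + 1) / 2 = (g + 1) + g * (g + 1) / 2 := by
    have : (g + 1) * (g + 1 + 1) = g * (g + 1) + 2 * (g + 1) := by ring
    rw [this, Nat.add_mul_div_left _ _ (by norm_num)]
    exact Nat.add_comm _ _
  rw [hg, h1, h2]
  have hy : y = (g : Int) + 1 := by omega
  rw [hy]
  push_cast
  ring

theorem pvTri_nonpos (y : Int) (h : y ≤ 0) : pvTri y = 0 := by
  unfold pvTri
  have : y.toNat = 0 := by omega
  rw [this]
  norm_num

theorem pvTri_nonneg (y : Int) : 0 ≤ pvTri y := by unfold pvTri; positivity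

-- the termination measure of A's loop strictly decreases whenever the loop continues
theorem measure_dec (ys : List Int) (yval y : Int) (h : pvM ys ≤ yval + y) :
    pvMeasure ys (yval + y) (y - 1) < pvMeasure ys yval y := by
  unfold pvMeasure
  by_cases hy : y ≤ 0
  · have e1 : pvTri y = 0 := pvTri_nonpos y hy
    have e2 : pvTri (y - 1) = 0 := pvTri_nonpos (y - 1) (by omega)
    omega
  · have e1 : pvTri y = y + pvTri (y - 1) := pvTri_pred y (by omega)
    have e2 : 0 ≤ pvTri (y - 1) := pvTri_nonneg (y - 1)
    omega

-- characterization of A's loop: if K is the first step whose position leaves the 'keep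
-- looping' region [pvM, ∞), the loop returns -1 or the running maximum at K
theorem loop_eq (ys : List Int) (y0 : Int) : ∀ (n : Nat) (j K : Nat), j < K →
    pA y0 K < pvM ys → (∀ i, j < i → i < K → pvM ys ≤ pA y0 i) →
    pvMeasure ys (pA y0 j) (y0 - j) + 1 ≤ n →
    travelLoop ys n (pA y0 j) (mxA y0 j) (y0 - j) =
      (if pA y0 K < (PySem.List.pyGet? ys 0).getD 0 then -1 else mxA y0 K) := by
  intro n
  induction n with
  | zero => intro j K _ _ _ hfuel; omega
  | succ n ih =>
      intro j K h1 hK hmin hfuel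
      simp only [travelLoop]
      have hstep : pA y0 j + (y0 - (j : Int)) = pA y0 (j + 1) := by simp [pA]
      have hmx : max (mxA y0 j) (pA y0 (j + 1)) = mxA y0 (j + 1) := by simp [mxA]
      rcases Nat.eq_or_lt_of_le (Nat.succ_le_of_lt h1) with hjK | hjK
      · -- the loop exits at this step (j + 1 = K)
        subst hjK
        have hKM : pA y0 (j + 1) < pvM ys := hK
        unfold pvM at hKM
        by_cases hb : pA y0 (j + 1) < (PySem.List.pyGet? ys 0).getD 0
        · have hs : insideRange (pA y0 (j + 1)) ys = -1 := by
            simp only [insideRange]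
            rw [if_pos hb]
          simp only [hstep, hmx, hs]
          norm_num [hb]
        · have hb2 : pA y0 (j + 1) ≤ (PySem.List.pyGet? ys 1).getD 0 := by omega
          have hs : insideRange (pA y0 (j + 1)) ys = 0 := by
            simp only [insideRange]
            rw [if_neg hb, if_pos ⟨by omega, hb2⟩]
          simp only [hstep, hmx, hs]
          norm_num [hb]
      · -- position still above the range: status = 1, recurse
        have hge : pvM ys ≤ pA y0 (j + 1) := hmin (j + 1) (by omega) hjK
        have hgeM := hge
        unfold pvM at hgeM
        have hc1 : ¬ pA y0 (j + 1) < (PySem.List.pyGet? ys 0).getD 0 := by omega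
        have hc2 : ¬ ((PySem.List.pyGet? ys 0).getD 0 ≤ pA y0 (j + 1) ∧
            pA y0 (j + 1) ≤ (PySem.List.pyGet? ys 1).getD 0) := fun h => by omega
        have hs : insideRange (pA y0 (j + 1)) ys = 1 := by
          simp only [insideRange]
          rw [if_neg hc1, if_neg hc2]
        simp only [hstep, hmx, hs]
        norm_num
        have hdec := measure_dec ys (pA y0 j) (y0 - j) (by rw [hstep]; exact hge)
        rw [hstep] at hdec
        have hcast : y0 - (j : Int) - 1 = y0 - ((j + 1 : Nat) : Int) := by push_cast; ring
        rw [hcast] at hdec ⊢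
        exact ih (j + 1) K hjK hK (fun i hi1 hi2 => hmin i (by omega) hi2) (by omega)

-- the loop's exit step exists (the position eventually falls below the range)
theorem exists_exit (ys : List Int) (y0 : Int) :
    ∃ K : Nat, 1 ≤ K ∧ pA y0 K < pvM ys ∧ ∀ i, 1 ≤ i → i < K → pvM ys ≤ pA y0 i := by
  have hS : y0 < ((y0.toNat + 1 : Nat) : Int) := by push_cast; omega
  have hd := pA_decr_strict y0 (y0.toNat + 1)
    ((y0.toNat + 1) + (pA y0 (y0.toNat + 1) - pvM ys + 1).toNat) (by omega) hS
  have hcast : (((y0.toNat + 1) + (pA y0 (y0.toNat + 1) - pvM ys + 1).toNat : Nat) : Int)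
      = ((y0.toNat + 1 : Nat) : Int) + ((pA y0 (y0.toNat + 1) - pvM ys + 1).toNat : Int) := by
    push_cast; ring
  have hNlt : pA y0 ((y0.toNat + 1) + (pA y0 (y0.toNat + 1) - pvM ys + 1).toNat) < pvM ys := by
    omega
  have hex : ∃ k : Nat, 1 ≤ k ∧ pA y0 k < pvM ys :=
    ⟨(y0.toNat + 1) + (pA y0 (y0.toNat + 1) - pvM ys + 1).toNat, by omega, hNlt⟩
  obtain ⟨hK1, hK2⟩ := Nat.find_spec hex
  refine ⟨Nat.find hex, hK1, hK2, fun i hi1 hi2 => ?_⟩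
  have hmin := Nat.find_min hex hi2
  simp only [not_and, not_lt] at hmin
  exact hmin hi1

-- binary-search specification
theorem bsearch_spec (y0 top : Int) (n : Nat) : ∀ (lo hi : Int), (hi - lo).toNat ≤ n →
    lo < hi → top < posB y0 lo → posB y0 hi ≤ top →
    lo < bsearchB y0 top n lo hi ∧ bsearchB y0 top n lo hi ≤ hi ∧
      posB y0 (bsearchB y0 top n lo hi) ≤ top ∧ top < posB y0 (bsearchB y0 top n lo hi - 1) := by
  induction n with
  | zero => intro lo hi h1 h2; omega
  | succ n ih =>
      intro lo hi hn hlt hlo hhi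
      simp only [bsearchB]
      by_cases hgap : hi - lo > 1
      · rw [if_pos hgap]
        have hmid : PySem.Int.floordiv (lo + hi) 2 = (lo + hi) / 2 :=
          PySem.Int.floordiv_eq_ediv_of_pos (by omega)
        have hb1 : lo < PySem.Int.floordiv (lo + hi) 2 := by rw [hmid]; omega
        have hb2 : PySem.Int.floordiv (lo + hi) 2 < hi := by rw [hmid]; omega
        by_cases hpm : posB y0 (PySem.Int.floordiv (lo + hi) 2) > top
        · rw [if_pos hpm]
          have := ih (PySem.Int.floordiv (lo + hi) 2) hi (by omega) hb2 hpm hhi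
          exact ⟨by omega, this.2.1, this.2.2⟩
        · rw [if_neg hpm]
          have := ih lo (PySem.Int.floordiv (lo + hi) 2) (by omega) hb1 hlo (by omega)
          exact ⟨this.1, by omega, this.2.2⟩
      · rw [if_neg hgap]
        have : hi = lo + 1 := by omega
        refine ⟨by omega, by omega, hhi, ?_⟩
        rw [this]; simpa using hlo

-- ===== VERDICT (by name: the statement is the Claim_ definition above) =====
theorem travel_y_spec : Claim_equal_travel_y := by
  intro y ys t _hDom _hPre
  unfold Spec_travel_y travel_y travel_y_alt
  by_cases ht : t ≤ 0
  · rw [if_neg (by omega), if_pos ht]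
  · rw [if_pos (by omega), if_neg ht]
    show travelLoop ys (pvMeasure ys 0 y + 1) 0 0 y =
      (if y ≤ (PySem.List.pyGet? ys 1).getD 0 then
         (if y ≥ (PySem.List.pyGet? ys 0).getD 0 then max 0 y else -1)
       else
         (if posB y (bsearchB y ((PySem.List.pyGet? ys 1).getD 0)
              (max y 0 + 1 + (posB y (max y 0 + 1) - (PySem.List.pyGet? ys 1).getD 0)
                - (max y 0 + 1)).toNat (max y 0 + 1)
              (max y 0 + 1 + (posB y (max y 0 + 1) - (PySem.List.pyGet? ys 1).getD 0)))
              ≥ (PySem.List.pyGet? ys 0).getD 0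
          then (if y > 0 then PySem.Int.floordiv (y * (y + 1)) 2 else 0) else -1))
    obtain ⟨K, hK1, hKlt, hKmin⟩ := exists_exit ys y
    have hA : travelLoop ys (pvMeasure ys 0 y + 1) 0 0 y
        = if pA y K < (PySem.List.pyGet? ys 0).getD 0 then -1 else mxA y K := by
      have := loop_eq ys y (pvMeasure ys 0 y + 1) 0 K hK1 hKlt
        (fun i hi1 hi2 => hKmin i hi1 hi2) (by simp [pA])
      simpa [pA, mxA] using this
    rw [hA]
    have hMdef : pvM ys = max ((PySem.List.pyGet? ys 0).getD 0) ((PySem.List.pyGet? ys 1).getD 0 + 1) := rfl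
    have hp1 : pA y 1 = y := by simp [pA]
    by_cases hyt : y ≤ (PySem.List.pyGet? ys 1).getD 0
    · -- the very first step is already at or below the top: K = 1
      rw [if_pos hyt]
      have hK1e : K = 1 := by
        by_contra hne
        have := hKmin 1 (by omega) (by omega)
        rw [hp1, hMdef] at this
        omega
      subst hK1e
      have hmx1 : mxA y 1 = max 0 y := by simp [mxA, pA]
      rw [hp1, hmx1]
      by_cases hlow : y < (PySem.List.pyGet? ys 0).getD 0
      · rw [if_pos hlow, if_neg (by omega)]
      · rw [if_neg hlow, if_pos (by omega)]
    · -- y is above the top of the range: B's binary search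
      rw [if_neg hyt]
      push_neg at hyt
      have hScast : ((y.toNat + 1 : Nat) : Int) = max y 0 + 1 := by push_cast; omega
      have hposlo : posB y (max y 0 + 1) = pA y (y.toNat + 1) := by
        rw [← hScast, posB_natCast]
      have hpAS : (PySem.List.pyGet? ys 1).getD 0 < pA y (y.toNat + 1) := by
        by_cases hy0 : 0 ≤ y
        · have h1 : pA y 1 ≤ pA y (y.toNat + 1) :=
            pA_incr y 1 (y.toNat + 1) (by omega) (by push_cast; omega)
          omega
        · have hS1 : y.toNat + 1 = 1 := by omega
          rw [hS1]; omega
      -- the search interval: pos(hi) ≤ top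
      have hdpos : (0:Int) ≤ pA y (y.toNat + 1) - (PySem.List.pyGet? ys 1).getD 0 := by omega
      have hhicast : max y 0 + 1 + (posB y (max y 0 + 1) - (PySem.List.pyGet? ys 1).getD 0)
          = (((y.toNat + 1) + (pA y (y.toNat + 1) - (PySem.List.pyGet? ys 1).getD 0).toNat : Nat) : Int) := by
        rw [hposlo, ← hScast]; push_cast; omega
      have hposhi : posB y (max y 0 + 1 + (posB y (max y 0 + 1) - (PySem.List.pyGet? ys 1).getD 0))
          ≤ (PySem.List.pyGet? ys 1).getD 0 := by
        rw [hhicast, posB_natCast]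
        have := pA_decr_strict y (y.toNat + 1)
          ((y.toNat + 1) + (pA y (y.toNat + 1) - (PySem.List.pyGet? ys 1).getD 0).toNat)
          (by omega) (by push_cast; omega)
        push_cast at this
        omega
      obtain ⟨hr1, hr2, hr3, hr4⟩ := bsearch_spec y ((PySem.List.pyGet? ys 1).getD 0)
        ((max y 0 + 1 + (posB y (max y 0 + 1) - (PySem.List.pyGet? ys 1).getD 0) - (max y 0 + 1)).toNat)
        (max y 0 + 1)
        (max y 0 + 1 + (posB y (max y 0 + 1) - (PySem.List.pyGet? ys 1).getD 0))
        le_rfl (by rw [hposlo]; omega) (by rw [hposlo]; omega) hposhi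
      set r := bsearchB y ((PySem.List.pyGet? ys 1).getD 0)
        (max y 0 + 1 + (posB y (max y 0 + 1) - (PySem.List.pyGet? ys 1).getD 0)
          - (max y 0 + 1)).toNat (max y 0 + 1)
        (max y 0 + 1 + (posB y (max y 0 + 1) - (PySem.List.pyGet? ys 1).getD 0)) with hrdef
      have hrpos : 1 ≤ r := by omega
      have hrcast : r = ((r.toNat : Nat) : Int) := by omega
      have hrncast : r - 1 = ((r.toNat - 1 : Nat) : Int) := by omega
      have hposr : posB y r = pA y r.toNat := by
        conv_lhs => rw [hrcast]
        exact posB_natCast y r.toNat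
      have hposr1 : posB y (r - 1) = pA y (r.toNat - 1) := by
        conv_lhs => rw [hrncast]
        exact posB_natCast y (r.toNat - 1)
      have hrS : (y.toNat + 1) < r.toNat := by omega
      have hF2 : pA y r.toNat ≤ (PySem.List.pyGet? ys 1).getD 0 := by rw [← hposr]; exact hr3
      have hF1 : ∀ i : Nat, 1 ≤ i → i < r.toNat → (PySem.List.pyGet? ys 1).getD 0 < pA y i := by
        intro i hi1 hi2
        by_cases hiS : i ≤ y.toNat + 1
        · by_cases hy0 : 0 ≤ y
          · have h1 : pA y 1 ≤ pA y i := pA_incr y 1 i hi1 (by omega)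
            omega
          · have : i = 1 := by omega
            subst this; omega
        · have h1 : pA y (r.toNat - 1) ≤ pA y i := pA_decr y i (r.toNat - 1) (by omega) (by omega)
          rw [hposr1] at hr4
          omega
      have hrnM : pA y r.toNat < pvM ys := by rw [hMdef]; omega
      have hKle : K ≤ r.toNat := by
        by_contra hgt
        have := hKmin r.toNat (by omega) (by omega)
        omega
      by_cases hcase : (PySem.List.pyGet? ys 0).getD 0 ≤ pA y r.toNat
      · -- B returns the peak; A exits in-range at the same step
        have hKrn : K = r.toNat := by
          by_contra hne
          have h1 := hF1 K hK1 (by omega)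
          have h2 : pA y K < (PySem.List.pyGet? ys 0).getD 0 := by rw [hMdef] at hKlt; omega
          omega
        rw [hKrn, if_neg (by omega), if_pos (by rw [hposr]; omega)]
        by_cases hy0 : 0 < y
        · rw [if_pos hy0]
          have hpeak : mxA y r.toNat = pA y (y.toNat + 1) := mxA_peak y (by omega) r.toNat (by omega)
          have hSy : ((y.toNat + 1 : Nat) : Int) = y + 1 := by push_cast; omega
          have heven : PySem.Int.floordiv (y * (y + 1)) 2 * 2 = y * (y + 1) := by
            have hyy : y * (y + 1) = ((y.toNat * (y.toNat + 1) : Nat) : Int) := by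
              have hy' : y = (y.toNat : Int) := by omega
              conv_lhs => rw [hy']
              push_cast; ring
            rw [hyy]
            rw [show ((2:Int)) = ((2:Nat):Int) from rfl, PySem.Int.floordiv_natCast]
            rw [← Nat.cast_ofNat (n := 2), ← Nat.cast_mul]
            norm_cast
            exact Nat.div_mul_cancel (Nat.even_mul_succ_self y.toNat).two_dvd
          have hclosed : pA y (y.toNat + 1) = PySem.Int.floordiv (y * (y + 1)) 2 := by
            have := posB_natCast y (y.toNat + 1)
            rw [hSy] at this
            unfold posB at this
            rw [show (y + 1) * (y + 1 - 1) = y * (y + 1) by ring,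
                show (y + 1) * y = y * (y + 1) by ring] at this
            omega
          rw [hpeak, hclosed]
        · rw [if_neg hy0]
          exact mxA_nonpos y (by omega) r.toNat
      · -- B returns -1; A also exits below the range
        have hKlow : pA y K < (PySem.List.pyGet? ys 0).getD 0 := by
          by_contra hge
          push_neg at hge
          have h2 : pA y K ≤ (PySem.List.pyGet? ys 1).getD 0 := by rw [hMdef] at hKlt; omega
          have hKge : r.toNat ≤ K := by
            by_contra hlt'
            exact absurd h2 (not_le.mpr (hF1 K hK1 (by omega)))
          have hKeq : K = r.toNat := by omega
          rw [hKeq] at hge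
          omega
        rw [if_pos hKlow, if_neg (by simp only [ge_iff_le, hposr]; exact hcase)]
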